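-- pv_equiv track=rewrite | github.com/jamesw1892/AdventOfCode | 2022/05/Part2.py | parse_arrangement
-- ===== SOURCE A (Python) =====
-- from typing import List
-- from collections import deque
--
-- def parse_arrangement(lines: List[str]) -> List[deque]:
--     stacks = []
--     for _ in lines[-1].split():
--         stacks.append(deque())
--
--     # reversed and ignoring the (now) first which was the last with stack numbers
--     for line in lines[::-1][1:]:
--         for stack_num, stack in enumerate(stacks):
--             letter = line[4 * stack_num + 1]
--             if letter != " ":
--                 stack.append(letter)
--
--     return stacks
-- ===== SOURCE B (Python) =====
-- from typing import List
-- from collections import deque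
--
-- def parse_arrangement(lines: List[str]) -> List[deque]:
--     n = len(lines[-1].split())
--     return [deque(line[4 * j + 1]
--                   for line in reversed(lines[:-1])
--                   if line[4 * j + 1] != " ")
--             for j in range(n)]
-- ===== Notes on version B (the rewrite author's own statement) =====
-- stated objective: simpler
-- what changed: B builds the result column-major (one comprehension per stack index over the rows bottom-to-top) instead of A's row-major loop that mutates every stack per line; no mutable stack list is threaded through the rows.
import Mathlib
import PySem

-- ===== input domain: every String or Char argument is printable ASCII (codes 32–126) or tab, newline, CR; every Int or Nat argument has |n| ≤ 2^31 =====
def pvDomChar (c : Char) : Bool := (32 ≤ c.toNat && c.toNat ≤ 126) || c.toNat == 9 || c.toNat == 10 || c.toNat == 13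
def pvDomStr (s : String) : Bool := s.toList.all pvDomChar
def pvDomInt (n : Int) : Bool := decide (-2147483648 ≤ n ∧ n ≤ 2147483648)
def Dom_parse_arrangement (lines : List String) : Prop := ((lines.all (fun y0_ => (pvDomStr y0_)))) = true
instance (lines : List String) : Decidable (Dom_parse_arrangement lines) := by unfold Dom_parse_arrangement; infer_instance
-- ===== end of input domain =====

-- B parses the arrangement column-major (one pass per stack index over the rows, bottom-to-top)
-- instead of A's row-major loop mutating every stack per line; same result, simpler decomposition.


-- ===== PORT A =====
-- Row-major: build k empty sts, then for each line (reversed, minus the number row)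
-- push the letter at column 4*j+1 onto stack j (deque.append = append at the end).
def parse_arrangement (lines : List String) : List (List String) :=
  match PySem.List.pyGet? lines (-1) with
  | none => []  -- lines[-1] raises IndexError on []: excluded by Pre_
  | some last =>
    let sts : List (List String) :=
      (PySem.Str.split₀ last).foldl (fun st _ => st ++ [([] : List String)]) []
    (((PySem.List.slice? lines none none (-1)).getD []).drop 1).foldl
      (fun sts line =>
        (PySem.List.enumerate sts).map (fun p =>
          match PySem.Str.pyGet? line (4 * p.1 + 1) with
          | none => p.2  -- line[4*j+1] raises IndexError: excluded by Pre_
          | some letter => if letter ≠ ' ' then p.2 ++ [String.ofList [letter]] else p.2))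
      sts

-- ===== PORT B =====
-- Column-major: for each stack index j, fold the rows bottom-to-top collecting column 4*j+1.
def parse_arrangement_alt (lines : List String) : List (List String) :=
  match PySem.List.pyGet? lines (-1) with
  | none => []  -- lines[-1] raises IndexError on []: excluded by Pre_
  | some last =>
    (PySem.List.pyRange 0 ((PySem.Str.split₀ last).length : Int) 1).map (fun j =>
      lines.dropLast.reverse.foldl
        (fun acc line =>
          match PySem.Str.pyGet? line (4 * j + 1) with
          | none => acc  -- line[4*j+1] raises IndexError: excluded by Pre_
          | some letter => if letter ≠ ' ' then acc ++ [String.ofList [letter]] else acc)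
        [])

-- ===== PRECONDITION & SPEC =====
-- Pre_ excludes exactly the inputs on which A raises IndexError: the empty list (lines[-1])
-- and inputs where some non-last line is too short for a read column 4*j+1.
def Pre_parse_arrangement (lines : List String) : Prop :=
  lines ≠ [] ∧ ∀ s ∈ lines.dropLast,
    ∀ j : Nat, j < (PySem.Str.split₀ (lines.getLastD "")).length → 4 * j + 1 < s.toList.length
instance (lines : List String) : Decidable (Pre_parse_arrangement lines) := by
  unfold Pre_parse_arrangement; infer_instance
def pvWitness_parse_arrangement : List String := ["[A] [B]", " 1   2 "]
def Spec_parse_arrangement (lines : List String) (out : List (List String)) : Prop := out = parse_arrangement_alt lines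
instance (lines : List String) (out : List (List String)) : Decidable (Spec_parse_arrangement lines out) := by unfold Spec_parse_arrangement; infer_instance

-- ===== CLAIM (what is proved, stated in full; the proofs are below) =====
def Claim_equal_parse_arrangement : Prop := ∀ (lines : List String), Dom_parse_arrangement lines → Pre_parse_arrangement lines → Spec_parse_arrangement lines (parse_arrangement lines)

-- ===== LEMMAS AND PROOFS =====

-- Folding A's per-line step (enumerate + map) over rows keeps [] at [].
theorem pvFoldNil (f : String → Int → List String → List String) :
    ∀ (rows : List String) (s : Int),
      rows.foldl (fun st line => (PySem.List.enumerate st s).map (fun p => f line p.1 p.2)) [] = [] := by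
  intro rows
  induction rows with
  | nil => intro s; rfl
  | cons line rows ih =>
    intro s
    simp only [List.foldl_cons, PySem.List.enumerate_nil, List.map_nil]
    exact ih s

-- Peeling off the head stack: the fold acts on the head with column index s and on the tail with s+1.
theorem pvFoldCons (f : String → Int → List String → List String) :
    ∀ (rows : List String) (a : List String) (st : List (List String)) (s : Int),
      rows.foldl (fun st line => (PySem.List.enumerate st s).map (fun p => f line p.1 p.2)) (a :: st)
      = (rows.foldl (fun x line => f line s x) a)
        :: rows.foldl (fun st line => (PySem.List.enumerate st (s + 1)).map (fun p => f line p.1 p.2)) st := by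
  intro rows
  induction rows with
  | nil => intro a st s; rfl
  | cons line rows ih =>
    intro a st s
    simp only [List.foldl_cons, PySem.List.enumerate_cons, List.map_cons]
    exact ih (f line s a) _ s

-- Row-major fold over k empty sts equals the column-major map over the stack indices.
theorem pvFoldRep (f : String → Int → List String → List String) :
    ∀ (k : Nat) (s : Int) (rows : List String),
      rows.foldl (fun st line => (PySem.List.enumerate st s).map (fun p => f line p.1 p.2))
        (List.replicate k [])
      = (PySem.List.pyRange s (s + k) 1).map (fun j => rows.foldl (fun acc line => f line j acc) []) := by
  intro k
  induction k with
  | zero =>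
    intro s rows
    simp only [List.replicate, Nat.cast_zero, add_zero, PySem.List.pyRange_one_eq_nil (le_refl s),
      List.map_nil]
    exact pvFoldNil f rows s
  | succ k ih =>
    intro s rows
    rw [List.replicate_succ, pvFoldCons f rows [] (List.replicate k []) s, ih (s + 1) rows]
    push_cast
    rw [PySem.List.pyRange_one_cons (by omega : s < s + ((k : Int) + 1)),
      show s + ((k : Int) + 1) = s + 1 + (k : Int) by ring]
    simp only [List.map_cons]

theorem parse_arrangement_spec : Claim_equal_parse_arrangement := by
  intro lines _ hpre
  unfold Spec_parse_arrangement
  rcases List.eq_nil_or_concat lines with rfl | ⟨l', x, rfl⟩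
  · exact absurd rfl hpre.1
  · simp only [List.concat_eq_append] at *
    unfold parse_arrangement parse_arrangement_alt
    rw [PySem.List.pyGet?_neg_one_append_singleton, PySem.List.slice?_none_none_neg_one]
    simp only [Option.getD_some, List.reverse_append, List.reverse_cons, List.reverse_nil,
      List.nil_append, List.singleton_append, List.drop_succ_cons, List.drop_zero,
      List.dropLast_concat]
    rw [PySem.List.foldl_append_singleton_eq_map (fun _ => ([] : List String)), List.nil_append,
      List.map_const']
    rw [pvFoldRep (fun line j acc =>
      match PySem.Str.pyGet? line (4 * j + 1) with
      | none => acc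
      | some letter => if letter ≠ ' ' then acc ++ [String.ofList [letter]] else acc)
      (PySem.Str.split₀ x).length 0 l'.reverse]
    simp only [zero_add]
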